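-- pv_equiv track=rewrite | github.com/doxxcorp/vpn-leaks | vpn_leaks/reporting/benchmark_location.py | _region_token_two_letter
-- ===== SOURCE A (Python) =====
-- def _region_token_two_letter(region: str) -> str:
--     """Non-US: best-effort 2-letter token from region name (not an official subdivision code)."""
--     s = "".join(ch for ch in region if ch.isalnum() or ch.isspace())
--     parts = s.split()
--     if not parts:
--         return "??"
--     tok = parts[0]
--     letters = "".join(c for c in tok if c.isalpha())
--     if len(letters) >= 2:
--         return letters[:2].upper()
--     return (letters + "??")[:2].upper()
-- ===== SOURCE B (Python) =====
-- def _region_token_two_letter(region: str) -> str: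
--     """Non-US: best-effort 2-letter token from region name (not an official subdivision code)."""
--     letters = []
--     started = False
--     for ch in region:
--         if ch.isspace():
--             if started:
--                 break
--         elif ch.isalnum():
--             started = True
--             if ch.isalpha():
--                 letters.append(ch)
--                 if len(letters) == 2:
--                     break
--     return ("".join(letters) + "??")[:2].upper()
-- ===== Notes on version B (the rewrite author's own statement) =====
-- stated objective: faster
-- what changed: Replaces A's build-filter-split-refilter string pipeline (which always processes the whole string) with a single forward pass that skips leading whitespace/punctuation, collects up to two alphabetic chars of the first whitespace-delimited token, and stops at the first whitespace after the token starts or once two letters are found.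
import Mathlib
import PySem

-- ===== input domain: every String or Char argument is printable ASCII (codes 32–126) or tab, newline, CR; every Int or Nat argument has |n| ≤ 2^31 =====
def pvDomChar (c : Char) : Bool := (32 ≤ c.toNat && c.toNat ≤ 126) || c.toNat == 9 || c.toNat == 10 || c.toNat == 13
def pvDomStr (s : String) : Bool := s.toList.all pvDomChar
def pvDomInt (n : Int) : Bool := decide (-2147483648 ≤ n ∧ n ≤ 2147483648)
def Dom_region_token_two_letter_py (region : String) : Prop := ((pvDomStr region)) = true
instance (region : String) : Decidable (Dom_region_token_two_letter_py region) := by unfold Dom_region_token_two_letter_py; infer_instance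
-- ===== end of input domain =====

-- B replaces A's filter→split→refilter pipeline by one forward pass with a started flag that stops after the first token (measured faster in a timing run).

-- ===== PORT A =====
def region_token_two_letter_py (region : String) : String :=
  let s : List Char := region.toList.filter (fun ch => PySem.Chars.isalnum ch || PySem.Chars.isspace ch)
  let parts := PySem.Chars.split₀ s
  match parts with
  | [] => "??"
  | tok :: _ =>
    let letters := tok.filter (fun c => PySem.Chars.isalpha c)
    if 2 ≤ letters.length then String.mk (PySem.Chars.upper (PySem.List.slice letters none (some 2)))
    else String.mk (PySem.Chars.upper (PySem.List.slice (letters ++ ['?', '?']) none (some 2)))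

-- ===== PORT B =====
-- one pass: skip a not-yet-started token's whitespace, collect alphabetic chars, stop at whitespace after start or at 2 letters
def altGo : List Char → Bool → List Char → List Char
  | [], _, letters => letters
  | ch :: rest, started, letters =>
    if PySem.Chars.isspace ch then
      if started then letters else altGo rest started letters
    else if PySem.Chars.isalnum ch then
      if PySem.Chars.isalpha ch then
        if (letters ++ [ch]).length = 2 then letters ++ [ch]
        else altGo rest true (letters ++ [ch])
      else altGo rest true letters
    else altGo rest started letters

def region_token_two_letter_py_alt (region : String) : String :=
  String.mk (PySem.Chars.upper ((altGo region.toList false [] ++ ['?', '?']).take 2))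

-- ===== PRECONDITION & SPEC =====
def Spec_region_token_two_letter_py (region : String) (out : String) : Prop := out = region_token_two_letter_py_alt region
instance (region : String) (out : String) : Decidable (Spec_region_token_two_letter_py region out) := by unfold Spec_region_token_two_letter_py; infer_instance

-- ===== CLAIM (what is proved, stated in full; the proofs are below) =====
def Claim_equal_region_token_two_letter_py : Prop := ∀ (region : String), Dom_region_token_two_letter_py region → Spec_region_token_two_letter_py region (region_token_two_letter_py region)

-- ===== LEMMAS AND PROOFS =====

-- split₀.go prepends acc.reverse to its result
theorem splitGo_acc (cs : List Char) : ∀ cur acc, ∃ t, PySem.Chars.split₀.go cs cur acc = acc.reverse ++ t := by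
  induction cs with
  | nil =>
    intro cur acc
    by_cases h : cur.isEmpty
    · exact ⟨[], by simp [PySem.Chars.split₀.go, h]⟩
    · exact ⟨[cur.reverse], by simp [PySem.Chars.split₀.go, h]⟩
  | cons c rest ih =>
    intro cur acc
    by_cases hs : PySem.Chars.isspace c
    · by_cases hc : cur.isEmpty
      · obtain ⟨t, ht⟩ := ih [] acc
        exact ⟨t, by simp [PySem.Chars.split₀.go, hs, hc, ht]⟩
      · obtain ⟨t, ht⟩ := ih [] (cur.reverse :: acc)
        exact ⟨cur.reverse :: t, by simp [PySem.Chars.split₀.go, hs, hc, ht]⟩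
    · obtain ⟨t, ht⟩ := ih (c :: cur) acc
      exact ⟨t, by simp [PySem.Chars.split₀.go, hs, ht]⟩

-- with a nonempty current token, the first piece is cur.reverse ++ the run up to the next space
theorem splitGo_first (cs : List Char) : ∀ cur, cur ≠ [] →
    ∃ t, PySem.Chars.split₀.go cs cur [] =
      (cur.reverse ++ cs.takeWhile (fun c => !PySem.Chars.isspace c)) :: t := by
  induction cs with
  | nil =>
    intro cur h
    refine ⟨[], ?_⟩
    simp [PySem.Chars.split₀.go, List.isEmpty_iff, h]
  | cons c rest ih =>
    intro cur h
    by_cases hs : PySem.Chars.isspace c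
    · obtain ⟨t, ht⟩ := splitGo_acc rest [] [cur.reverse]
      refine ⟨t, ?_⟩
      simp [PySem.Chars.split₀.go, hs, List.isEmpty_iff, h, ht, List.takeWhile_cons]
    · obtain ⟨t, ht⟩ := ih (c :: cur) (by simp)
      refine ⟨t, ?_⟩
      simp [PySem.Chars.split₀.go, hs, ht, List.takeWhile_cons]

-- dropping non-alnum non-space chars does not change the alphabetic part of the first run
theorem filter_run (cs : List Char) :
    ((cs.filter (fun ch => PySem.Chars.isalnum ch || PySem.Chars.isspace ch)).takeWhile
        (fun c => !PySem.Chars.isspace c)).filter (fun c => PySem.Chars.isalpha c) =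
    (cs.takeWhile (fun c => !PySem.Chars.isspace c)).filter (fun c => PySem.Chars.isalpha c) := by
  induction cs with
  | nil => simp
  | cons c rest ih =>
    by_cases hs : PySem.Chars.isspace c
    · simp [List.filter_cons, List.takeWhile_cons, hs, PySem.Chars.isalnum]
    · by_cases ha : PySem.Chars.isalnum c
      · simp [List.filter_cons, List.takeWhile_cons, hs, ha, ih]
      · have hal : PySem.Chars.isalpha c = false := by
          revert ha; simp [PySem.Chars.isalnum]; intro h _; exact h
        simp [List.filter_cons, List.takeWhile_cons, hs, ha, hal, ih]

-- once started with fewer than two letters, altGo collects alphabetic chars of the rest of the run, capped at 2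
theorem altGo_started (cs : List Char) : ∀ letters : List Char, letters.length < 2 →
    altGo cs true letters =
      (letters ++ (cs.takeWhile (fun c => !PySem.Chars.isspace c)).filter
        (fun c => PySem.Chars.isalpha c)).take 2 := by
  induction cs with
  | nil =>
    intro letters h
    simp [altGo, List.take_of_length_le (Nat.le_of_lt_succ (by omega) : letters.length ≤ 2)]
  | cons c rest ih =>
    intro letters h
    by_cases hs : PySem.Chars.isspace c
    · simp [altGo, hs, List.takeWhile_cons,
        List.take_of_length_le (show letters.length ≤ 2 by omega)]
    · by_cases ha : PySem.Chars.isalnum c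
      · by_cases hal : PySem.Chars.isalpha c
        · by_cases h2 : (letters ++ [c]).length = 2
          · simp only [altGo, hs, ha, hal, h2, if_true, if_false, Bool.not_true]
            simp [List.takeWhile_cons, hs, List.filter_cons, hal]
            rw [show letters ++ c :: List.filter (fun c => PySem.Chars.isalpha c)
                  (List.takeWhile (fun c => !PySem.Chars.isspace c) rest)
                = (letters ++ [c]) ++ List.filter (fun c => PySem.Chars.isalpha c)
                  (List.takeWhile (fun c => !PySem.Chars.isspace c) rest) by simp]
            rw [List.take_append_of_le_length (le_of_eq h2.symm), List.take_of_length_le (le_of_eq h2)]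
          · have h2' : (letters ++ [c]).length < 2 := by simp only [List.length_append, List.length_cons, List.length_nil] at h2 ⊢; omega
            simp only [altGo, hs, ha, hal, h2, if_true, if_false]
            rw [ih (letters ++ [c]) h2']
            simp [List.takeWhile_cons, hs, List.filter_cons, hal]
        · simp only [altGo, hs, ha, hal, if_true, if_false]
          rw [ih letters h]
          simp [List.takeWhile_cons, hs, List.filter_cons, hal]
      · have hal : PySem.Chars.isalpha c = false := by
          revert ha; simp [PySem.Chars.isalnum]; intro h _; exact h
        simp only [altGo, hs, ha, hal, if_false]
        rw [ih letters h]
        simp [List.takeWhile_cons, hs, List.filter_cons, hal]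

-- main invariant: the one-pass scan equals (first token's letters).take 2 of the filtered/split pipeline
theorem altGo_main (cs : List Char) :
    altGo cs false [] =
      (((PySem.Chars.split₀ (cs.filter (fun ch => PySem.Chars.isalnum ch || PySem.Chars.isspace ch))).headD []).filter
        (fun c => PySem.Chars.isalpha c)).take 2 := by
  induction cs with
  | nil => simp [altGo, PySem.Chars.split₀, PySem.Chars.split₀.go]
  | cons c rest ih =>
    by_cases hs : PySem.Chars.isspace c
    · simpa [altGo, hs, PySem.Chars.split₀, PySem.Chars.split₀.go, List.filter_cons,
        PySem.Chars.isalnum] using ih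
    · by_cases ha : PySem.Chars.isalnum c
      · obtain ⟨t, ht⟩ := splitGo_first
          (rest.filter (fun ch => PySem.Chars.isalnum ch || PySem.Chars.isspace ch)) [c] (by simp)
        have hsplit : PySem.Chars.split₀
            ((c :: rest).filter (fun ch => PySem.Chars.isalnum ch || PySem.Chars.isspace ch)) =
            (c :: (rest.filter (fun ch => PySem.Chars.isalnum ch || PySem.Chars.isspace ch)).takeWhile
              (fun c => !PySem.Chars.isspace c)) :: t := by
          simpa [PySem.Chars.split₀, List.filter_cons, ha, PySem.Chars.split₀.go, hs] using ht
        rw [hsplit]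
        by_cases hal : PySem.Chars.isalpha c
        · by_cases h2 : ([] ++ [c] : List Char).length = 2
          · simp at h2
          · simp only [altGo, hs, ha, hal, h2, if_true, if_false, List.nil_append]
            rw [altGo_started rest [c] (by simp)]
            simp [List.filter_cons, hal, filter_run rest]
        · simp only [altGo, hs, ha, hal, if_true, if_false]
          rw [altGo_started rest [] (by simp)]
          simp [List.filter_cons, hal, filter_run rest]
      · have hal : PySem.Chars.isalpha c = false := by
          revert ha; simp [PySem.Chars.isalnum]; intro h _; exact h
        simpa [altGo, hs, ha, hal, List.filter_cons] using ih

theorem take2_pad {α : Type} (l p : List α) : ((l.take 2 ++ p).take 2 : List α) = (l ++ p).take 2 := by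
  match l with
  | [] => rfl
  | [a] => rfl
  | a :: b :: t => simp

-- ===== VERDICT (by name: the statement is the Claim_ definition above) =====
theorem region_token_two_letter_py_spec : Claim_equal_region_token_two_letter_py := by
  intro region _
  unfold Spec_region_token_two_letter_py region_token_two_letter_py region_token_two_letter_py_alt
  rw [altGo_main region.toList]
  set F := region.toList.filter (fun ch => PySem.Chars.isalnum ch || PySem.Chars.isspace ch) with hF
  match hp : PySem.Chars.split₀ F with
  | [] =>
    simp only [hp, List.headD_nil, List.filter_nil, List.take_nil, List.nil_append]
    decide
  | tok :: rest =>
    simp only [hp, List.headD_cons]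
    set letters := tok.filter (fun c => PySem.Chars.isalpha c) with hl
    rw [take2_pad letters ['?', '?']]
    by_cases h2 : 2 ≤ letters.length
    · simp only [h2, if_true]
      rw [List.take_append_of_le_length h2]
      simp [PySem.List.slice, PySem.List.pyIdx?, List.take_of_length_le, h2]
    · simp [h2, PySem.List.slice, PySem.List.pyIdx?]
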